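-- pv_equiv track=rewrite | github.com/openvdb/fvdb-core | src/benchmarks/dispatch/visualize_benchmark.py | detect_benchmark_type
-- ===== SOURCE A (Python) =====
-- def detect_benchmark_type(benchmarks):
--     """Auto-detect benchmark type from naming patterns."""
--     names = [b["name"] for b in benchmarks]
--
--     # for_each benchmark detection
--     if any("ForEach_" in n or "SoL_" in n for n in names):
--         return "for_each"
--     # Synthetic voxel benchmark detection
--     if any("Uniform_" in n or "Unbalanced_" in n for n in names):
--         return "synthetic"
--     # CPU pool comparison detection
--     if any("CPU_NoAlloc" in n for n in names):
--         return "cpu_pool"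
--     # Fallback
--     return "unknown"
-- ===== SOURCE B (Python) =====
-- _PATTERNS = (("ForEach_", "SoL_"), ("Uniform_", "Unbalanced_"), ("CPU_NoAlloc",))
-- _LABELS = ("for_each", "synthetic", "cpu_pool", "unknown")
--
--
-- def _classify(name):
--     """Priority index of one name: first pattern group it matches, else 3."""
--     for i, pats in enumerate(_PATTERNS):
--         if any(p in name for p in pats):
--             return i
--     return 3
--
--
-- def detect_benchmark_type(benchmarks):
--     """Auto-detect benchmark type: min priority index over per-name classifications."""
--     return _LABELS[min((_classify(b["name"]) for b in benchmarks), default=3)]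
-- ===== Notes on version B (the rewrite author's own statement) =====
-- stated objective: alternative
-- what changed: Replaces the staged any()-scans over a materialised name list by a table-driven formulation: each name is mapped to a priority index via a data table of pattern groups and the answer is the label at the minimum index over all names.
import Mathlib
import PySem

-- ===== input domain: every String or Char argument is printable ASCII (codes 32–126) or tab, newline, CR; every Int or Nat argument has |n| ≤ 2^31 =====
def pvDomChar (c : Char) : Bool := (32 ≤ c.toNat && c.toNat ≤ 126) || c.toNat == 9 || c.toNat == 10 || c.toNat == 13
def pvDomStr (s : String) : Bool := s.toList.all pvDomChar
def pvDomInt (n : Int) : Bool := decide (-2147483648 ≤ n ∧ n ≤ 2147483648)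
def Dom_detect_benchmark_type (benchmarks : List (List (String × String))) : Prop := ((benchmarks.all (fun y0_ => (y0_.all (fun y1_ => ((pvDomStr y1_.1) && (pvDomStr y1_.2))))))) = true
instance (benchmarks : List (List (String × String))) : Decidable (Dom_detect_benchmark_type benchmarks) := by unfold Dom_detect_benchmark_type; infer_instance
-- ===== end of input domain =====

-- B is a table-driven reformulation: each name gets a priority index, the answer is the label at the minimum index; objective: alternative.

-- ===== PORT A =====
-- b["name"] (dict lookup; Pre_ guarantees the key is present)
def pvName (b : List (String × String)) : String :=
  ((PySem.Dict.mk b).get? "name").getD ""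

def detect_benchmark_type (benchmarks : List (List (String × String))) : String :=
  let names := benchmarks.map pvName
  if names.any (fun n => PySem.Str.isIn "ForEach_" n || PySem.Str.isIn "SoL_" n) then "for_each"
  else if names.any (fun n => PySem.Str.isIn "Uniform_" n || PySem.Str.isIn "Unbalanced_" n) then "synthetic"
  else if names.any (fun n => PySem.Str.isIn "CPU_NoAlloc" n) then "cpu_pool"
  else "unknown"

-- ===== PORT B =====
-- the pattern table _PATTERNS and label table _LABELS of Source B
def pvPatterns : List (List String) :=
  [["ForEach_", "SoL_"], ["Uniform_", "Unbalanced_"], ["CPU_NoAlloc"]]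
def pvLabels : List String := ["for_each", "synthetic", "cpu_pool", "unknown"]

-- _classify: loop over the enumerated table, return the first matching group's index, else 3
def pvClassifyLoop (name : String) : List (Int × List String) → Int
  | [] => 3
  | (i, pats) :: rest =>
      if pats.any (fun p => PySem.Str.isIn p name) then i
      else pvClassifyLoop name rest

def pvClassify (name : String) : Int :=
  pvClassifyLoop name (PySem.List.enumerate pvPatterns)

def detect_benchmark_type_alt (benchmarks : List (List (String × String))) : String :=
  -- min(..., default=3) over the per-name classifications, then index into the label table
  let best := (benchmarks.map (fun b => pvClassify (pvName b))).foldl min 3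
  (PySem.List.pyGet? pvLabels best).getD "unknown"

-- ===== PRECONDITION & SPEC =====
-- Pre_ excludes benchmarks missing the "name" key, on which Python A (and B) raise KeyError.
def Pre_detect_benchmark_type (benchmarks : List (List (String × String))) : Prop :=
  (benchmarks.all (fun b => (PySem.Dict.mk b).contains "name")) = true
instance (benchmarks : List (List (String × String))) : Decidable (Pre_detect_benchmark_type benchmarks) := by unfold Pre_detect_benchmark_type; infer_instance
def pvWitness_detect_benchmark_type : (List (List (String × String))) := ([[("name", "ForEach_foo")], [("name", "bar")]])

def Spec_detect_benchmark_type (benchmarks : List (List (String × String))) (out : String) : Prop := out = detect_benchmark_type_alt benchmarks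
instance (benchmarks : List (List (String × String))) (out : String) : Decidable (Spec_detect_benchmark_type benchmarks out) := by unfold Spec_detect_benchmark_type; infer_instance

-- ===== CLAIM (what is proved, stated in full; the proofs are below) =====
def Claim_equal_detect_benchmark_type : Prop := ∀ (benchmarks : List (List (String × String))), Dom_detect_benchmark_type benchmarks → Pre_detect_benchmark_type benchmarks → Spec_detect_benchmark_type benchmarks (detect_benchmark_type benchmarks)

-- ===== LEMMAS AND PROOFS =====
-- A's branch chain as a priority index over a list of names
def gIdx (l : List String) : Int :=
  if l.any (fun n => PySem.Str.isIn "ForEach_" n || PySem.Str.isIn "SoL_" n) then 0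
  else if l.any (fun n => PySem.Str.isIn "Uniform_" n || PySem.Str.isIn "Unbalanced_" n) then 1
  else if l.any (fun n => PySem.Str.isIn "CPU_NoAlloc" n) then 2 else 3

theorem pvClassify_eq (n : String) :
    pvClassify n = gIdx [n] := by
  simp only [pvClassify, pvPatterns, PySem.List.enumerate_cons, PySem.List.enumerate_nil,
    pvClassifyLoop, gIdx, List.any_cons, List.any_nil, Bool.or_false]
  split_ifs <;> rfl

theorem minChain (a b c la lb lc : Bool) :
    (if (a || la) = true then (0 : Int) else if (b || lb) = true then 1
       else if (c || lc) = true then 2 else 3)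
      = min (if a = true then 0 else if b = true then 1 else if c = true then 2 else 3)
            (if la = true then 0 else if lb = true then 1 else if lc = true then 2 else 3) := by
  revert a b c la lb lc
  decide

theorem gIdx_cons (x : String) (l : List String) :
    gIdx (x :: l) = min (gIdx [x]) (gIdx l) := by
  simp only [gIdx, List.any_cons, List.any_nil, Bool.or_false]
  exact minChain _ _ _ _ _ _

theorem gIdx_le (l : List String) : gIdx l ≤ 3 := by
  unfold gIdx; split_ifs <;> omega

theorem foldl_min_classify (l : List String) (k : Int) (hk : k ≤ 3) :
    (l.map pvClassify).foldl min k = min k (gIdx l) := by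
  induction l generalizing k with
  | nil => simp [gIdx]; omega
  | cons x xs ih =>
      have hx : min k (pvClassify x) ≤ 3 := le_trans (min_le_left _ _) hk
      simp only [List.map_cons, List.foldl_cons]
      rw [ih _ hx, gIdx_cons, pvClassify_eq, min_assoc]

-- ===== VERDICT (by name: the statement is the Claim_ definition above) =====
theorem detect_benchmark_type_spec : Claim_equal_detect_benchmark_type := by
  intro benchmarks _ _
  unfold Spec_detect_benchmark_type detect_benchmark_type detect_benchmark_type_alt
  have h : (benchmarks.map (fun b => pvClassify (pvName b))).foldl min 3
      = gIdx (benchmarks.map pvName) := by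
    have h3 := gIdx_le (benchmarks.map pvName)
    have := foldl_min_classify (benchmarks.map pvName) 3 (by omega)
    rw [List.map_map] at this
    rw [show (pvClassify ∘ pvName) = fun b => pvClassify (pvName b) from rfl] at this
    rw [this]; omega
  show (if _ then _ else _) = (PySem.List.pyGet? pvLabels ((benchmarks.map (fun b => pvClassify (pvName b))).foldl min 3)).getD "unknown"
  rw [h]
  unfold gIdx
  split_ifs <;> rfl
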